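-- pv_equiv track=rewrite | github.com/TheFortThatHolds/PUBLICBRAINBOX | model_select.py | pick_models
-- ===== SOURCE A (Python) =====
-- def pick_models(models_list):
--     """
--     Auto-select chat and embedding models from /v1/models response
--     without caring about provider or brand names.
--     """
--     if not models_list:
--         return None, None
--
--     ids = [m.get("id", "") for m in models_list]
--
--     # Heuristic: embeddings often contain 'embed' in the name
--     embed_candidates = [m for m in ids if "embed" in m.lower()]
--     embed_model = embed_candidates[0] if embed_candidates else None
--
--     # Heuristic: chat models often have these indicators
--     chat_keywords = [
--         "chat", "instruct", "qwen", "llama", "phi", "mistral",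
--         "gemma", "gpt", "claude", "command", "mixtral", "deepseek"
--     ]
--
--     chat_candidates = [
--         m for m in ids
--         if any(keyword in m.lower() for keyword in chat_keywords)
--         and "embed" not in m.lower()  # exclude embedding models
--     ]
--
--     # Prefer models with "instruct" or "chat" in name
--     priority_chat = [m for m in chat_candidates if any(p in m.lower() for p in ["instruct", "chat"])]
--     chat_model = (priority_chat or chat_candidates or ids)[0] if (priority_chat or chat_candidates or ids) else None
--
--     return chat_model, embed_model
-- ===== SOURCE B (Python) =====
-- CHAT_KEYWORDS = ["chat", "instruct", "qwen", "llama", "phi", "mistral",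
--                  "gemma", "gpt", "claude", "command", "mixtral", "deepseek"]
--
--
-- def _is_embed(mid):
--     return "embed" in mid.lower()
--
--
-- def _is_chat(mid):
--     return any(k in mid.lower() for k in CHAT_KEYWORDS)
--
--
-- def _is_priority(mid):
--     return "instruct" in mid.lower() or "chat" in mid.lower()
--
--
-- def pick_models(models_list):
--     """Single pass: track the first id, first embed model, first chat
--     candidate and first priority (chat/instruct) candidate while walking
--     the list once."""
--     if not models_list:
--         return None, None
--     first_id = None
--     first_embed = None
--     first_chat = None
--     first_priority = None
--     for m in models_list:
--         mid = m.get("id", "")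
--         if first_id is None:
--             first_id = mid
--         if _is_embed(mid):
--             if first_embed is None:
--                 first_embed = mid
--         elif _is_chat(mid):
--             if first_chat is None:
--                 first_chat = mid
--             if first_priority is None and _is_priority(mid):
--                 first_priority = mid
--     chat_model = first_priority if first_priority is not None else (
--         first_chat if first_chat is not None else first_id)
--     return chat_model, first_embed
-- ===== Notes on version B (the rewrite author's own statement) =====
-- stated objective: alternative
-- what changed: Replaces A's four list comprehensions over the ids (embed filter, chat filter, a second priority filter, plus a materialised ids list) by one loop over the model dicts that tracks only four 'first seen' optionals.
import Mathlib
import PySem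

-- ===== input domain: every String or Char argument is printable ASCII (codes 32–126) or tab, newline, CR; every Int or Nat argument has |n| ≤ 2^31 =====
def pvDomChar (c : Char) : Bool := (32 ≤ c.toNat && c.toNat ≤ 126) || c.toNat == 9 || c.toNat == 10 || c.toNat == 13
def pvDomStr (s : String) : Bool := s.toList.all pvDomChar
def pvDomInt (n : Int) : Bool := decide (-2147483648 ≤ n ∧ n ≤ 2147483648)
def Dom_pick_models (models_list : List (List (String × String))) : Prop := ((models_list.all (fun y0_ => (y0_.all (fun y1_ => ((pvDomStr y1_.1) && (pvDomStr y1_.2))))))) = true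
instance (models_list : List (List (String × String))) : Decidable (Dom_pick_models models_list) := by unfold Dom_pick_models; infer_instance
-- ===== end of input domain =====

-- B replaces A's four comprehension passes over the ids (embed filter, chat filter,
-- priority filter, plus the materialised ids list) by one left fold that keeps only
-- four 'first seen' optionals (objective: alternative, same asymptotic cost).

-- shared constants / predicates (the same keyword heuristics appear in both Pythons)
def chatKeywords : List String :=
  ["chat", "instruct", "qwen", "llama", "phi", "mistral",
   "gemma", "gpt", "claude", "command", "mixtral", "deepseek"]

-- m.get("id", "")
def modelId (m : List (String × String)) : String := PySem.Dict.getD (PySem.Dict.mk m) "id" ""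

-- "embed" in mid.lower()
def hasEmbed (s : String) : Bool := PySem.Str.isIn "embed" (PySem.Str.lower s)

-- any(k in mid.lower() for k in CHAT_KEYWORDS)
def hasChatKeyword (s : String) : Bool :=
  chatKeywords.any (fun k => PySem.Str.isIn k (PySem.Str.lower s))

-- A's priority test: any(p in m.lower() for p in ["instruct", "chat"])
def isPriority (s : String) : Bool :=
  (["instruct", "chat"] : List String).any (fun p => PySem.Str.isIn p (PySem.Str.lower s))

-- B's priority test: "instruct" in mid.lower() or "chat" in mid.lower()
def isPriorityOr (s : String) : Bool :=
  PySem.Str.isIn "instruct" (PySem.Str.lower s) || PySem.Str.isIn "chat" (PySem.Str.lower s)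

-- ===== PORT A =====
def pick_models (models_list : List (List (String × String))) : Option String × Option String :=
  if models_list = [] then (none, none)
  else
    let ids := models_list.map modelId
    let embed_candidates := ids.filter hasEmbed
    let embed_model := embed_candidates.head?
    let chat_candidates := ids.filter (fun m => hasChatKeyword m && !hasEmbed m)
    let priority_chat := chat_candidates.filter isPriority
    let pool := if !priority_chat.isEmpty then priority_chat
                else if !chat_candidates.isEmpty then chat_candidates else ids
    (pool.head?, embed_model)

-- ===== PORT B =====
-- the loop body of Source B: state = (first_id, first_embed, first_chat, first_priority)
def altStep (st : Option String × Option String × Option String × Option String)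
    (m : List (String × String)) :
    Option String × Option String × Option String × Option String :=
  let mid := modelId m
  let fid := if st.1.isNone then some mid else st.1
  if hasEmbed mid then
    (fid, if st.2.1.isNone then some mid else st.2.1, st.2.2.1, st.2.2.2)
  else if hasChatKeyword mid then
    (fid, st.2.1, if st.2.2.1.isNone then some mid else st.2.2.1,
     if st.2.2.2.isNone && isPriorityOr mid then some mid else st.2.2.2)
  else (fid, st.2.1, st.2.2.1, st.2.2.2)

def pick_models_alt (models_list : List (List (String × String))) : Option String × Option String :=
  if models_list = [] then (none, none)
  else
    let st := models_list.foldl altStep (none, none, none, none)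
    let (fid, fe, fc, fp) := st
    ((if fp.isSome then fp else if fc.isSome then fc else fid), fe)

-- ===== PRECONDITION & SPEC =====
def Spec_pick_models (models_list : List (List (String × String))) (out : Option String × Option String) : Prop := out = pick_models_alt models_list
instance (models_list : List (List (String × String))) (out : Option String × Option String) : Decidable (Spec_pick_models models_list out) := by unfold Spec_pick_models; infer_instance

-- ===== CLAIM (what is proved, stated in full; the proofs are below) =====
def Claim_equal_pick_models : Prop := ∀ (models_list : List (List (String × String))), Dom_pick_models models_list → Spec_pick_models models_list (pick_models models_list)

-- ===== LEMMAS AND PROOFS =====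

-- 'x if x is not None else y' on options
def pvOr (a b : Option String) : Option String := if a.isNone then b else a

lemma pvOr_none (b : Option String) : pvOr none b = b := rfl

lemma isPriorityOr_eq (s : String) : isPriorityOr s = isPriority s := by
  simp [isPriorityOr, isPriority]

-- loop invariant: after folding altStep over ms, each slot holds its old value,
-- or else the head of the corresponding filtered id list of ms
set_option maxHeartbeats 1000000 in
lemma altStep_foldl (ms : List (List (String × String)))
    (st : Option String × Option String × Option String × Option String) :
    ms.foldl altStep st =
      (pvOr st.1 ((ms.map modelId).head?),
       pvOr st.2.1 (((ms.map modelId).filter hasEmbed).head?),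
       pvOr st.2.2.1 (((ms.map modelId).filter (fun s => hasChatKeyword s && !hasEmbed s)).head?),
       pvOr st.2.2.2 (((ms.map modelId).filter
         (fun s => isPriority s && (hasChatKeyword s && !hasEmbed s))).head?)) := by
  induction ms generalizing st with
  | nil =>
      obtain ⟨fid, fe, fc, fp⟩ := st
      cases fid <;> cases fe <;> cases fc <;> cases fp <;> rfl
  | cons m ms ih =>
      obtain ⟨fid, fe, fc, fp⟩ := st
      rw [List.foldl_cons, ih]
      simp only [altStep, isPriorityOr_eq]
      by_cases he : hasEmbed (modelId m) = true <;>
      by_cases hk : hasChatKeyword (modelId m) = true <;>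
      by_cases hp : isPriority (modelId m) = true <;>
      cases fid <;> cases fe <;> cases fc <;> cases fp <;>
        simp_all [pvOr]

-- ===== VERDICT (by name: the statement is the Claim_ definition above) =====
set_option maxHeartbeats 1000000 in
theorem pick_models_spec : Claim_equal_pick_models := by
  intro ms _
  unfold Spec_pick_models
  cases ms with
  | nil => rfl
  | cons m rest =>
      simp only [pick_models, pick_models_alt, List.cons_ne_nil, if_false]
      rw [altStep_foldl]
      simp only [pvOr_none, List.filter_filter, List.map_cons]
      generalize List.map modelId rest = tl
      generalize modelId m = x
      cases hprio : List.filter (fun a => isPriority a && (hasChatKeyword a && !hasEmbed a)) (x :: tl) with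
      | cons v t => simp
      | nil =>
          cases hcc : List.filter (fun s => hasChatKeyword s && !hasEmbed s) (x :: tl) with
          | cons v t => simp
          | nil => simp
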